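-- pv_equiv track=rewrite | github.com/regularize/ccc | ccci/utils.py | __list_as_intervals
-- ===== SOURCE A (Python) =====
-- from itertools import groupby, chain, combinations
-- from operator import itemgetter
--
-- def __list_as_intervals(lst):
--     ranges = []
--     for k, g in groupby(
--         enumerate(sorted(set(lst))),
--         lambda x: x[0] - x[1]
--         ):
--         group = (map(itemgetter(1), g))
--         group = list(map(int, group))
--         new_range = str(group[0])
--         if len(group) > 1:
--             new_range += '-' + str(group[-1])
--         ranges += [new_range]
--     return ', '.join(ranges)
-- ===== SOURCE B (Python) =====
-- def __list_as_intervals(lst):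
--     s = set(lst)
--     out = []
--     for a in sorted(v for v in s if v - 1 not in s):
--         e = a
--         while e + 1 in s:
--             e += 1
--         out.append(str(int(a)) if e == a else str(int(a)) + '-' + str(int(e)))
--     return ', '.join(out)
-- ===== Notes on version B (the rewrite author's own statement) =====
-- stated objective: alternative
-- what changed: Replaced the sort-then-scan groupby/index-offset pass with a set-membership algorithm: run starts are the values v with v-1 not in the set, sorted; each run's end is found by walking e+1 in the set, so no adjacency scan of the sorted list happens at all.
import Mathlib
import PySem

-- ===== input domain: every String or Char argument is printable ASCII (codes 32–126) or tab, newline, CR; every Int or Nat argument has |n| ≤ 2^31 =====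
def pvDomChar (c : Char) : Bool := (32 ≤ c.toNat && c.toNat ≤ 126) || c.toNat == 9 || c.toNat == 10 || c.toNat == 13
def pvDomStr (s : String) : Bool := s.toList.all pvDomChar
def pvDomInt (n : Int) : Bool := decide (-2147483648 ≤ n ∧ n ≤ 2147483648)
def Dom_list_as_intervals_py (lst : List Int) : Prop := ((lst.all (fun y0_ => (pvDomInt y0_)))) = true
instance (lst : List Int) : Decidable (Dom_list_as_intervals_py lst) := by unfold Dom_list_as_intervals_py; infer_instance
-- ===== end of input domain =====

-- B replaces A's sort-then-groupby adjacency scan with a set-membership algorithm: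
-- run starts are the values v with v-1 not in the set, sorted; each run end is found
-- by walking e+1 membership tests (alternative decomposition, similar cost).

-- ===== PORT A =====
-- itertools.groupby specialised to the key used here (lambda x: x[0] - x[1]):
-- consecutive elements with equal key form one group.
def pvGroupby : List (Int × Int) → List (List (Int × Int))
  | [] => []
  | [x] => [[x]]
  | x :: y :: rest =>
    let gs := pvGroupby (y :: rest)   -- nonempty, since y :: rest is
    if x.1 - x.2 = y.1 - y.2 then (x :: gs.headD []) :: gs.tail else [x] :: gs

def list_as_intervals_py (lst : List Int) : String :=
  let ranges : List String :=
    (pvGroupby (PySem.List.enumerate (PySem.List.sorted (PySem.Set.ofList lst) (fun x => x) false) 0)).foldl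
      (fun ranges g =>
        let group := g.map Prod.snd          -- map(itemgetter(1), g); list(map(int, ·)) is the identity on ints
        let newRange := PySem.Int.toStr (group.headD 0)   -- group[0]; every group is nonempty
        let newRange := if 1 < group.length
          then newRange ++ "-" ++ PySem.Int.toStr (group.getLastD 0)   -- group[-1]; nonempty
          else newRange
        ranges ++ [newRange]) []
  PySem.Str.join ", " ranges

-- ===== PORT B =====
-- Source B's 'while e + 1 in s: e += 1' with fuel s.length: exact, because the visited
-- values e+1, e+2, … are distinct members of s, so the loop takes at most s.length steps.
def pvRunEnd (s : List Int) (e : Int) : Nat → Int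
  | 0 => e
  | fuel+1 => if PySem.Set.contains s (e+1) then pvRunEnd s (e+1) fuel else e

def list_as_intervals_py_alt (lst : List Int) : String :=
  let s := PySem.Set.ofList lst
  let starts := PySem.List.sorted (s.filter (fun v => !(PySem.Set.contains s (v-1)))) (fun x => x) false
  let out := starts.foldl (fun out a =>
    let e := pvRunEnd s a s.length
    out ++ [if e = a then PySem.Int.toStr a else PySem.Int.toStr a ++ "-" ++ PySem.Int.toStr e]) []
  PySem.Str.join ", " out

-- ===== PRECONDITION & SPEC =====
def Spec_list_as_intervals_py (lst : List Int) (out : String) : Prop := out = list_as_intervals_py_alt lst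
instance (lst : List Int) (out : String) : Decidable (Spec_list_as_intervals_py lst out) := by unfold Spec_list_as_intervals_py; infer_instance

-- ===== CLAIM (what is proved, stated in full; the proofs are below) =====
def Claim_equal_list_as_intervals_py : Prop := ∀ (lst : List Int), Dom_list_as_intervals_py lst → Spec_list_as_intervals_py lst (list_as_intervals_py lst)

-- ===== LEMMAS AND PROOFS =====

-- the common shape both programs compute: maximal runs of consecutive (+1) values
def pvRuns : List Int → List (List Int)
  | [] => []
  | [x] => [[x]]
  | x :: y :: rest =>
    let gs := pvRuns (y :: rest)      -- nonempty, since y :: rest is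
    if y = x + 1 then (x :: gs.headD []) :: gs.tail else [x] :: gs

def pvFmt (g : List Int) : String :=
  if 1 < g.length then PySem.Int.toStr (g.headD 0) ++ "-" ++ PySem.Int.toStr (g.getLastD 0)
  else PySem.Int.toStr (g.headD 0)

def pvEmit (a e : Int) : String :=
  if e = a then PySem.Int.toStr a else PySem.Int.toStr a ++ "-" ++ PySem.Int.toStr e

-- the consecutive block a, a+1, …, a+n-1
def pvChain (a : Int) : Nat → List Int
  | 0 => []
  | n+1 => a :: pvChain (a + 1) n

-- split a sorted tail at the first gap after a: (run length past a, remainder)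
def pvSplit (a : Int) : List Int → Nat × List Int
  | [] => (0, [])
  | x :: xs => if x = a + 1 then ((pvSplit x xs).1 + 1, (pvSplit x xs).2) else (0, x :: xs)

theorem pvGroupby_ne_nil (x : Int × Int) (xs : List (Int × Int)) : pvGroupby (x :: xs) ≠ [] := by
  cases xs with
  | nil => simp [pvGroupby]
  | cons y rest => simp only [pvGroupby]; split <;> simp

theorem pvRuns_ne_nil (x : Int) (xs : List Int) : pvRuns (x :: xs) ≠ [] := by
  cases xs with
  | nil => simp [pvRuns]
  | cons y rest => simp only [pvRuns]; split <;> simp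

-- A-side: the groupby grouping, projected to the values, is the run decomposition
theorem map_snd_pvGroupby (vs : List Int) : ∀ n : Int,
    (pvGroupby (PySem.List.enumerate vs n)).map (List.map Prod.snd) = pvRuns vs := by
  induction vs with
  | nil => intro n; simp [PySem.List.enumerate_nil, pvGroupby, pvRuns]
  | cons x xs ih =>
    intro n
    cases xs with
    | nil => simp [PySem.List.enumerate_cons, PySem.List.enumerate_nil, pvGroupby, pvRuns]
    | cons y rest =>
      rw [PySem.List.enumerate_cons, PySem.List.enumerate_cons]
      simp only [pvGroupby, pvRuns]
      cases hg : pvGroupby ((n + 1, y) :: PySem.List.enumerate rest (n + 1 + 1)) with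
      | nil => exact absurd hg (pvGroupby_ne_nil _ _)
      | cons g gs =>
        cases hr : pvRuns (y :: rest) with
        | nil => exact absurd hr (pvRuns_ne_nil _ _)
        | cons r rs =>
          have hih := ih (n + 1)
          rw [PySem.List.enumerate_cons, hg, hr] at hih
          simp only [List.map_cons, List.cons.injEq] at hih
          obtain ⟨h1, h2⟩ := hih
          by_cases hk : y = x + 1
          · rw [if_pos (show n - x = n + 1 - y by omega), if_pos hk]
            simp [h1, h2]
          · rw [if_neg (show ¬ (n - x = n + 1 - y) by omega), if_neg hk]
            simp [h1, h2]

-- A's foldl of appended singletons is a map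
theorem pvFoldl_ranges (gs : List (List (Int × Int))) :
    gs.foldl (fun ranges g => ranges ++ [pvFmt (g.map Prod.snd)]) []
      = gs.map (fun g => pvFmt (g.map Prod.snd)) := by
  rw [PySem.List.foldl_append_singleton_eq_map]
  simp

-- pvChain facts
theorem pvChain_headD (a : Int) (n : Nat) (d : Int) : (pvChain a (n+1)).headD d = a := rfl

theorem pvChain_length (n : Nat) : ∀ a : Int, (pvChain a n).length = n := by
  induction n with
  | zero => intro a; rfl
  | succ n ih => intro a; simp [pvChain, ih]

theorem pvChain_getLastD (n : Nat) : ∀ (a d : Int), (pvChain a (n+1)).getLastD d = a + n := by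
  induction n with
  | zero => intro a d; simp [pvChain]
  | succ n ih =>
    intro a d
    show (a :: pvChain (a+1) (n+1)).getLastD d = a + (n+1 : Nat)
    rw [List.getLastD_cons, ih (a+1) a]
    push_cast; ring

theorem mem_pvChain (n : Nat) : ∀ (a x : Int), x ∈ pvChain a n ↔ ∃ i : Nat, i < n ∧ x = a + i := by
  induction n with
  | zero => intro a x; simp [pvChain]
  | succ n ih =>
    intro a x
    show x ∈ a :: pvChain (a+1) n ↔ _
    simp only [List.mem_cons, ih (a+1)]
    constructor
    · rintro (rfl | ⟨i, hi, rfl⟩)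
      · exact ⟨0, by omega, by simp⟩
      · exact ⟨i+1, by omega, by push_cast; ring⟩
    · rintro ⟨i, hi, rfl⟩
      cases i with
      | zero => left; simp
      | succ j => right; exact ⟨j, by omega, by push_cast; ring⟩

theorem pvRuns_chain (n : Nat) : ∀ a : Int, pvRuns (pvChain a (n+1)) = [pvChain a (n+1)] := by
  induction n with
  | zero => intro a; simp [pvChain, pvRuns]
  | succ n ih =>
    intro a
    show pvRuns (a :: (a+1) :: pvChain (a+1+1) n) = [a :: pvChain (a+1) (n+1)]
    simp only [pvRuns]
    rw [show ((a+1) :: pvChain (a+1+1) n) = pvChain (a+1) (n+1) from rfl, ih (a+1)]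
    simp [pvChain]

theorem pvRuns_chain_gap (n : Nat) : ∀ (a v : Int) (rest : List Int), v ≠ a + n + 1 →
    pvRuns (pvChain a (n+1) ++ v :: rest) = pvChain a (n+1) :: pvRuns (v :: rest) := by
  induction n with
  | zero =>
    intro a v rest hv
    show pvRuns (a :: v :: rest) = [a] :: pvRuns (v :: rest)
    simp only [pvRuns]
    rw [if_neg (show ¬ v = a + 1 by intro h; exact hv (by omega))]
  | succ n ih =>
    intro a v rest hv
    show pvRuns (a :: (a+1) :: (pvChain (a+1+1) n ++ v :: rest)) = (a :: pvChain (a+1) (n+1)) :: pvRuns (v :: rest)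
    simp only [pvRuns]
    rw [show ((a+1) :: (pvChain (a+1+1) n ++ v :: rest)) = pvChain (a+1) (n+1) ++ v :: rest from rfl,
        ih (a+1) v rest (by omega)]
    simp [pvChain]

theorem pvFmt_chain (n : Nat) (a : Int) : pvFmt (pvChain a (n+1)) = pvEmit a (a + n) := by
  cases n with
  | zero => simp [pvChain, pvFmt, pvEmit]
  | succ n =>
    rw [pvFmt, if_pos (by rw [pvChain_length]; omega), pvChain_headD, pvChain_getLastD,
        pvEmit, if_neg (by omega)]

-- pvSplit facts
theorem pvSplit_recon : ∀ (tl : List Int) (a : Int),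
    a :: tl = pvChain a ((pvSplit a tl).1 + 1) ++ (pvSplit a tl).2 := by
  intro tl
  induction tl with
  | nil => intro a; simp [pvSplit, pvChain]
  | cons x xs ih =>
    intro a
    by_cases hx : x = a + 1
    · rw [pvSplit, if_pos hx]
      show a :: x :: xs = a :: (pvChain (a+1) ((pvSplit x xs).1 + 1) ++ (pvSplit x xs).2)
      rw [← hx, ← ih x]
    · rw [pvSplit, if_neg hx]
      simp [pvChain]

theorem pvSplit_len : ∀ (tl : List Int) (a : Int), (pvSplit a tl).2.length ≤ tl.length := by
  intro tl
  induction tl with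
  | nil => intro a; simp [pvSplit]
  | cons x xs ih =>
    intro a
    by_cases hx : x = a + 1
    · rw [pvSplit, if_pos hx]
      exact le_trans (ih x) (by simp)
    · rw [pvSplit, if_neg hx]

theorem pvSplit_gap : ∀ (tl : List Int) (a r : Int) (rs : List Int),
    (pvSplit a tl).2 = r :: rs → r ≠ a + ((pvSplit a tl).1 : Int) + 1 := by
  intro tl
  induction tl with
  | nil => intro a r rs h; simp [pvSplit] at h
  | cons x xs ih =>
    intro a r rs h
    by_cases hx : x = a + 1
    · rw [pvSplit, if_pos hx] at h ⊢
      have := ih x r rs h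
      push_cast
      omega
    · rw [pvSplit, if_neg hx] at h ⊢
      obtain ⟨rfl, rfl⟩ := List.cons.injEq .. ▸ h
      simpa using hx

-- B-side: runEnd walks to the end of the consecutive block
theorem pvRunEnd_eq (s : List Int) : ∀ (k : Nat) (a : Int) (fuel : Nat), k ≤ fuel →
    (∀ j : Nat, 1 ≤ j → j ≤ k → PySem.Set.contains s (a + j) = true) →
    PySem.Set.contains s (a + k + 1) = false →
    pvRunEnd s a fuel = a + k := by
  intro k
  induction k with
  | zero =>
    intro a fuel _ _ hlast
    cases fuel with
    | zero => simp [pvRunEnd]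
    | succ f =>
      have hl : PySem.Set.contains s (a + 1) = false := by
        have he : a + ((0:Nat):Int) + 1 = a + 1 := by push_cast; ring
        rwa [he] at hlast
      rw [pvRunEnd, if_neg (by rw [hl]; exact Bool.false_ne_true)]
      simp
  | succ k ih =>
    intro a fuel hfuel hj hlast
    cases fuel with
    | zero => omega
    | succ f =>
      have h1 : PySem.Set.contains s (a + 1) = true := by
        have := hj 1 (by omega) (by omega)
        simpa using this
      rw [pvRunEnd, if_pos h1]
      have := ih (a+1) f (by omega)
        (fun j h1j hjk => by
          have := hj (j+1) (by omega) (by omega)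
          rw [show a + 1 + (j:Int) = a + ((j+1 : Nat) : Int) by push_cast; ring]
          exact this)
        (by rw [show a + 1 + (k:Int) + 1 = a + ((k+1 : Nat) : Int) + 1 by push_cast; ring]; exact hlast)
      rw [this]
      push_cast; ring

-- the main B-side lemma: over a strictly sorted list whose membership agrees with s
-- (from b-1 upward), filtering run starts and walking run ends reproduces the runs.
theorem pvMain : ∀ (n : Nat) (vs : List Int), vs.length ≤ n →
    ∀ (s : List Int) (b : Int) (fuel : Nat),
    vs.Pairwise (· < ·) →
    (∀ y ∈ vs, b ≤ y) →
    (∀ x : Int, b - 1 ≤ x → (PySem.Set.contains s x = true ↔ x ∈ vs)) →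
    vs.length ≤ fuel →
    (vs.filter (fun v => !PySem.Set.contains s (v-1))).map (fun a => pvEmit a (pvRunEnd s a fuel))
      = (pvRuns vs).map pvFmt := by
  intro n
  induction n with
  | zero =>
    intro vs hlen s b fuel _ _ _ _
    have : vs = [] := List.length_eq_zero_iff.mp (by omega)
    subst this
    simp [pvRuns]
  | succ n ih =>
    intro vs hlen s b fuel hpw hb hm hfuel
    cases hvs : vs with
    | nil => simp [pvRuns]
    | cons v tl =>
      subst hvs
      -- decompose the head run
      set k := (pvSplit v tl).1 with hk
      set rest := (pvSplit v tl).2 with hrest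
      have hre : v :: tl = pvChain v (k+1) ++ rest := pvSplit_recon tl v
      have hbv : b ≤ v := hb v (by simp)
      have hvmin : ∀ y ∈ tl, v < y := (List.pairwise_cons.mp hpw).1
      -- v - 1 is not a member
      have hpv : PySem.Set.contains s (v-1) = false := by
        by_contra h
        have h' : PySem.Set.contains s (v-1) = true := by
          cases hcv : PySem.Set.contains s (v-1) <;> simp_all
        have := (hm (v-1) (by omega)).mp h'
        rcases List.mem_cons.mp this with h0 | h0
        · omega
        · exact absurd (hvmin _ h0) (by omega)
      -- interior chain members v+1 … v+k are members, hence not run starts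
      have hchainmem : ∀ i : Nat, i < k + 1 → (v + (i:Int)) ∈ v :: tl := by
        intro i hi
        rw [hre]
        exact List.mem_append_left _ ((mem_pvChain (k+1) v _).mpr ⟨i, hi, rfl⟩)
      have hpint : ∀ i : Nat, 1 ≤ i → i ≤ k → (!PySem.Set.contains s (v + (i:Int) - 1)) = false := by
        intro i h1 h2
        have hmem : (v + ((i-1 : Nat):Int)) ∈ v :: tl := hchainmem (i-1) (by omega)
        have hc : PySem.Set.contains s (v + (i:Int) - 1) = true := by
          rw [show v + (i:Int) - 1 = v + ((i-1 : Nat):Int) by push_cast; omega]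
          exact (hm _ (by omega)).mpr hmem
        rw [hc]; rfl
      -- the chain filters to exactly its head
      have hnil : (pvChain (v+1) k).filter (fun v => !PySem.Set.contains s (v-1)) = [] := by
        rw [List.filter_eq_nil_iff]
        intro x hx
        rcases (mem_pvChain k (v+1) x).mp hx with ⟨i, hi, rfl⟩
        have hfalse := hpint (i+1) (by omega) (by omega)
        rw [show v + 1 + (i:Int) - 1 = v + ((i+1 : Nat):Int) - 1 by push_cast; ring]
        intro hcontra
        rw [hfalse] at hcontra
        exact Bool.false_ne_true hcontra
      have hfchain : List.filter (fun v => !PySem.Set.contains s (v-1)) (pvChain v (k+1)) = [v] := by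
        show List.filter _ (v :: pvChain (v+1) k) = [v]
        rw [List.filter_cons_of_pos (by rw [hpv]; rfl), hnil]
      -- v + k + 1 is not a member
      have hnk1 : PySem.Set.contains s (v + (k:Int) + 1) = false := by
        by_contra h
        have h' : PySem.Set.contains s (v + (k:Int) + 1) = true := by
          cases hcv : PySem.Set.contains s (v + (k:Int) + 1) <;> simp_all
        have hmem := (hm _ (by omega)).mp h'
        rw [hre] at hmem
        rcases List.mem_append.mp hmem with h0 | h0
        · rcases (mem_pvChain (k+1) v _).mp h0 with ⟨i, hi, hEq⟩
          omega
        · cases hr0 : rest with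
          | nil => rw [hr0] at h0; simp at h0
          | cons r rs =>
            have hgap := pvSplit_gap tl v r rs (hrest ▸ hr0)
            have hrmem : r ∈ v :: tl := by rw [hre, hr0]; exact List.mem_append_right _ (by simp)
            -- chain last element is below r by sortedness
            have hpw' := hre ▸ hpw
            have hcrlt := (List.pairwise_append.mp hpw').2.2
            have hvk : (v + (k:Int)) ∈ pvChain v (k+1) := (mem_pvChain (k+1) v _).mpr ⟨k, by omega, rfl⟩
            have hlt : v + (k:Int) < r := hcrlt _ hvk r (by rw [hr0]; simp)
            -- so r ≥ v+k+2, and all rest elements are ≥ r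
            have hge : ∀ y ∈ rest, r ≤ y := by
              intro y hy
              rw [hr0] at hy
              rcases List.mem_cons.mp hy with rfl | hy'
              · exact le_refl _
              · have hpwr : (r :: rs).Pairwise (· < ·) := hr0 ▸ (List.pairwise_append.mp hpw').2.1
                exact le_of_lt ((List.pairwise_cons.mp hpwr).1 y hy')
            have := hge _ h0
            omega
      -- the head run's end
      have hL : (v :: tl).length = k + 1 + rest.length := by
        rw [hre, List.length_append, pvChain_length]
      have hL1 : (v :: tl).length = tl.length + 1 := by simp
      have hend : pvRunEnd s v fuel = v + (k:Int) := by
        apply pvRunEnd_eq s k v fuel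
        · omega
        · intro j h1 h2
          exact (hm _ (by omega)).mpr (hchainmem j (by omega))
        · exact hnk1
      -- split into the head run and the remainder
      cases hr0 : rest with
      | nil =>
        rw [hre, hr0, List.append_nil, hfchain, pvRuns_chain k v]
        simp only [List.map_cons, List.map_nil]
        rw [pvFmt_chain k v, hend]
      | cons r rs =>
        have hgap := pvSplit_gap tl v r rs (hrest ▸ hr0)
        rw [hre, hr0, List.filter_append, hfchain,
            pvRuns_chain_gap k v r rs (by intro h; exact hgap (by omega))]
        simp only [List.map_cons, List.map_append]
        rw [pvFmt_chain k v]
        have hpw' := hre ▸ hpw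
        have hpwr : (r :: rs).Pairwise (· < ·) := hr0 ▸ (List.pairwise_append.mp hpw').2.1
        have hcrlt := (List.pairwise_append.mp hpw').2.2
        have hvk : (v + (k:Int)) ∈ pvChain v (k+1) := (mem_pvChain (k+1) v _).mpr ⟨k, by omega, rfl⟩
        have hlt : v + (k:Int) < r := hcrlt _ hvk r (by rw [hr0]; simp)
        have hlenr : (r :: rs).length ≤ n := by
          have h1 : rest.length ≤ tl.length := hrest ▸ pvSplit_len tl v
          rw [hr0] at h1
          omega
        have hmr : ∀ x : Int, r - 1 ≤ x → (PySem.Set.contains s x = true ↔ x ∈ r :: rs) := by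
          intro x hx
          rw [hm x (by omega), hre, hr0]
          constructor
          · intro hmem
            rcases List.mem_append.mp hmem with h0 | h0
            · rcases (mem_pvChain (k+1) v x).mp h0 with ⟨i, hi, rfl⟩
              omega
            · exact h0
          · intro h0; exact List.mem_append_right _ h0
        have hbr : ∀ y ∈ r :: rs, r ≤ y := by
          intro y hy
          rcases List.mem_cons.mp hy with rfl | hy'
          · exact le_refl _
          · exact le_of_lt ((List.pairwise_cons.mp hpwr).1 y hy')
        have hfr : (r :: rs).length ≤ fuel := by
          have hL2 := hL
          rw [hr0] at hL2
          omega
        rw [ih (r :: rs) hlenr s r fuel hpwr hbr hmr hfr, hend]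
        simp

-- B's foldl of appended singletons is a map
theorem pvFoldlB (s starts : List Int) :
    starts.foldl (fun out a => out ++ [pvEmit a (pvRunEnd s a s.length)]) []
    = starts.map (fun a => pvEmit a (pvRunEnd s a s.length)) := by
  rw [PySem.List.foldl_append_singleton_eq_map]
  simp

-- ===== VERDICT (by name: the statement is the Claim_ definition above) =====
theorem list_as_intervals_py_spec : Claim_equal_list_as_intervals_py := by
  unfold Claim_equal_list_as_intervals_py
  intro lst _
  unfold Spec_list_as_intervals_py
  show PySem.Str.join ", " ((pvGroupby (PySem.List.enumerate (PySem.List.sorted (PySem.Set.ofList lst) (fun x => x) false) 0)).foldl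
        (fun ranges g => ranges ++ [pvFmt (g.map Prod.snd)]) [])
    = PySem.Str.join ", " ((PySem.List.sorted ((PySem.Set.ofList lst).filter (fun v => !(PySem.Set.contains (PySem.Set.ofList lst) (v-1)))) (fun x => x) false).foldl
        (fun out a => out ++ [pvEmit a (pvRunEnd (PySem.Set.ofList lst) a (PySem.Set.ofList lst).length)]) [])
  rw [pvFoldl_ranges,
      show (fun g : List (Int × Int) => pvFmt (g.map Prod.snd)) = pvFmt ∘ List.map Prod.snd from rfl,
      ← List.map_map, map_snd_pvGroupby, pvFoldlB]
  set s := PySem.Set.ofList lst with hs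
  set vs := PySem.List.sorted s (fun x => x) false with hvs
  -- the sorted filtered set is the filter of the sorted set
  have hstarts : PySem.List.sorted (s.filter (fun v => !(PySem.Set.contains s (v-1)))) (fun x => x) false
      = vs.filter (fun v => !(PySem.Set.contains s (v-1))) := by
    apply PySem.List.sorted_eq_of_perm_of_pairwise_lt
    · exact (PySem.List.sorted_perm s (fun x => x) false).filter _
    · exact (PySem.List.sorted_ofList_pairwise_lt lst).filter _
  rw [hstarts]
  congr 1
  have hlenvs : vs.length = s.length := (PySem.List.sorted_perm s (fun x => x) false).length_eq
  have hpw0 : vs.Pairwise (· < ·) := PySem.List.sorted_ofList_pairwise_lt lst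
  have hmem : ∀ x : Int, PySem.Set.contains s x = true ↔ x ∈ vs := by
    intro x
    rw [PySem.Set.contains_iff]
    exact (PySem.List.mem_sorted s (fun x => x) false x).symm
  cases hv0 : vs with
  | nil => simp [pvRuns]
  | cons m t =>
    have hpw : (m :: t).Pairwise (· < ·) := hv0 ▸ hpw0
    have hb : ∀ y ∈ m :: t, m ≤ y := by
      intro y hy
      rcases List.mem_cons.mp hy with rfl | hy'
      · exact le_refl _
      · exact le_of_lt ((List.pairwise_cons.mp hpw).1 y hy')
    have hm' : ∀ x : Int, m - 1 ≤ x → (PySem.Set.contains s x = true ↔ x ∈ m :: t) := by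
      intro x _
      rw [hmem x, hv0]
    exact (pvMain (m :: t).length (m :: t) (le_refl _) s m s.length hpw hb hm'
      (by rw [← hv0, hlenvs])).symm
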